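-- pv_equiv track=rewrite | github.com/francoisissartel-cloud/vectora-inbox | src/vectora_core/matching/matcher.py | _identify_company_scope_type
-- ===== SOURCE A (Python) =====
-- from typing import Any, Dict, List, Set, Optional, Tuple
--
-- def _identify_company_scope_type(
--     companies_match: Set[str],
--     company_scope_modifiers: Dict[str, Any],
--     canonical_scopes: Dict[str, Any]
-- ) -> str:
--     """Identifie si companies sont pure_player, hybrid ou other."""
--     if not companies_match:
--         return 'none'
--
--     pure_player_scopes = company_scope_modifiers.get('pure_player_scopes', [])
--     hybrid_scopes = company_scope_modifiers.get('hybrid_scopes', [])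
--
--     company_scopes = canonical_scopes.get('companies', {})
--
--     # Vérifier pure players
--     for scope_key in pure_player_scopes:
--         scope_companies = set(company_scopes.get(scope_key, []))
--         if companies_match & scope_companies:
--             return 'pure_player'
--
--     # Vérifier hybrid
--     for scope_key in hybrid_scopes:
--         scope_companies = set(company_scopes.get(scope_key, []))
--         if companies_match & scope_companies:
--             return 'hybrid'
--
--     return 'other'
-- ===== SOURCE B (Python) =====
-- def _identify_company_scope_type(companies_match, company_scope_modifiers, canonical_scopes):
--     """Classify via a prebuilt company->type index, scanning matched companies once."""
--     if not companies_match: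
--         return 'none'
--     company_scopes = canonical_scopes.get('companies', {})
--     company_type = {}
--     for scope_key in company_scope_modifiers.get('hybrid_scopes', []):
--         for c in company_scopes.get(scope_key, []):
--             company_type[c] = 'hybrid'
--     for scope_key in company_scope_modifiers.get('pure_player_scopes', []):
--         for c in company_scopes.get(scope_key, []):
--             company_type[c] = 'pure_player'
--     has_pure = False
--     has_hybrid = False
--     for c in companies_match:
--         t = company_type.get(c)
--         if t == 'pure_player':
--             has_pure = True
--         elif t == 'hybrid':
--             has_hybrid = True
--     if has_pure:
--         return 'pure_player'
--     if has_hybrid: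
--         return 'hybrid'
--     return 'other'
-- ===== Notes on version B (the rewrite author's own statement) =====
-- stated objective: alternative
-- what changed: B builds a company->type dict index (hybrid scopes first, pure_player overwriting) and then makes one pass over companies_match collecting flags, instead of A's per-scope set intersections with early return.
import Mathlib
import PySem

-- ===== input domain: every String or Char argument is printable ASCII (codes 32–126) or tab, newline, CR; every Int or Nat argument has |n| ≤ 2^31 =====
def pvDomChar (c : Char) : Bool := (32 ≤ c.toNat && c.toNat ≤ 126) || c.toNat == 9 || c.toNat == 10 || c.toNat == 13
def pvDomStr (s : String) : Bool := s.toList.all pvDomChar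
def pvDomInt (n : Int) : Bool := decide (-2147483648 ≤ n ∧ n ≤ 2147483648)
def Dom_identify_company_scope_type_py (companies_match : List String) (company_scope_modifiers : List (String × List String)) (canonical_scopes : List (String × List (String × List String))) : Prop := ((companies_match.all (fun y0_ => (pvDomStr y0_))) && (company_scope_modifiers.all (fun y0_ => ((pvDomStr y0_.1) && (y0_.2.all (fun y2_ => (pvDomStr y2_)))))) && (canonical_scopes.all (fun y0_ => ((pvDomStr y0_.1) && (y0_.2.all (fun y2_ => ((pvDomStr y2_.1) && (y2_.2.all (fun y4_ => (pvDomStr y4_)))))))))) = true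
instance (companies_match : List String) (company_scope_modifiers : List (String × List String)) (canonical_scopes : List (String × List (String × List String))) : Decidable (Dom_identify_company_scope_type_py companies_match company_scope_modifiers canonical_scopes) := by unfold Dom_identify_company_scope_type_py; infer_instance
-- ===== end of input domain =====

-- B replaces A's per-scope set intersections by a prebuilt company->type dict index plus one pass over companies_match (alternative decomposition, same cost class).


-- ===== PORT A =====
-- Python: 'for scope_key in scopes: if companies_match & set(company_scopes.get(scope_key, [])): return <label>' — early-return loop
def pvScopeHit (companies_match : List String) (company_scopes : PySem.Dict String (List String)) : List String → Bool
  | [] => false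
  | scope_key :: rest =>
      let scope_companies := PySem.Set.ofList (company_scopes.getD scope_key [])
      if companies_match.any (fun c => scope_companies.contains c) then true
      else pvScopeHit companies_match company_scopes rest

def identify_company_scope_type_py (companies_match : List String) (company_scope_modifiers : List (String × List String)) (canonical_scopes : List (String × List (String × List String))) : String :=
  if companies_match = [] then "none"
  else
    let pure_player_scopes := (PySem.Dict.mk company_scope_modifiers).getD "pure_player_scopes" []
    let hybrid_scopes := (PySem.Dict.mk company_scope_modifiers).getD "hybrid_scopes" []
    let company_scopes := PySem.Dict.mk ((PySem.Dict.mk canonical_scopes).getD "companies" [])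
    if pvScopeHit companies_match company_scopes pure_player_scopes then "pure_player"
    else if pvScopeHit companies_match company_scopes hybrid_scopes then "hybrid"
    else "other"

-- ===== PORT B =====
-- 'for scope_key in ks: for c in company_scopes.get(scope_key, []): company_type[c] = t'
def pvBuildIndex (company_scopes : PySem.Dict String (List String)) (t : String) (ks : List String) (d : PySem.Dict String String) : PySem.Dict String String :=
  ks.foldl (fun d scope_key => (company_scopes.getD scope_key []).foldl (fun d c => d.insert c t) d) d

def identify_company_scope_type_py_alt (companies_match : List String) (company_scope_modifiers : List (String × List String)) (canonical_scopes : List (String × List (String × List String))) : String :=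
  if companies_match = [] then "none"
  else
    let company_scopes := PySem.Dict.mk ((PySem.Dict.mk canonical_scopes).getD "companies" [])
    let company_type := pvBuildIndex company_scopes "pure_player" ((PySem.Dict.mk company_scope_modifiers).getD "pure_player_scopes" [])
      (pvBuildIndex company_scopes "hybrid" ((PySem.Dict.mk company_scope_modifiers).getD "hybrid_scopes" []) PySem.Dict.empty)
    let flags := companies_match.foldl (fun (f : Bool × Bool) c =>
      let t := company_type.get? c
      if t = some "pure_player" then (true, f.2)
      else if t = some "hybrid" then (f.1, true)
      else f) (false, false)
    if flags.1 then "pure_player"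
    else if flags.2 then "hybrid"
    else "other"

-- ===== PRECONDITION & SPEC =====
def Spec_identify_company_scope_type_py (companies_match : List String) (company_scope_modifiers : List (String × List String)) (canonical_scopes : List (String × List (String × List String))) (out : String) : Prop := out = identify_company_scope_type_py_alt companies_match company_scope_modifiers canonical_scopes
instance (companies_match : List String) (company_scope_modifiers : List (String × List String)) (canonical_scopes : List (String × List (String × List String))) (out : String) : Decidable (Spec_identify_company_scope_type_py companies_match company_scope_modifiers canonical_scopes out) := by unfold Spec_identify_company_scope_type_py; infer_instance

-- ===== CLAIM (what is proved, stated in full; the proofs are below) =====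
def Claim_equal_identify_company_scope_type_py : Prop := ∀ (companies_match : List String) (company_scope_modifiers : List (String × List String)) (canonical_scopes : List (String × List (String × List String))), Dom_identify_company_scope_type_py companies_match company_scope_modifiers canonical_scopes → Spec_identify_company_scope_type_py companies_match company_scope_modifiers canonical_scopes (identify_company_scope_type_py companies_match company_scope_modifiers canonical_scopes)

-- ===== LEMMAS AND PROOFS =====

-- union of the companies of a scope list
def pvUnion (company_scopes : PySem.Dict String (List String)) (ks : List String) : List String :=
  ks.flatMap (fun k => company_scopes.getD k [])

lemma pvScopeHit_iff (cm : List String) (cs : PySem.Dict String (List String)) (ks : List String) :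
    pvScopeHit cm cs ks = true ↔ ∃ c ∈ cm, c ∈ pvUnion cs ks := by
  induction ks with
  | nil => simp [pvScopeHit, pvUnion]
  | cons k rest ih =>
      have hany : (cm.any (fun c => (PySem.Set.ofList (cs.getD k [])).contains c)) = true
          ↔ ∃ c ∈ cm, c ∈ cs.getD k [] := by
        simp [PySem.Set.contains, List.contains_eq_mem, PySem.Set.mem_ofList]
      simp only [pvScopeHit]
      by_cases h : (cm.any (fun c => (PySem.Set.ofList (cs.getD k [])).contains c)) = true
      · rw [if_pos h]
        obtain ⟨c, hc, hm⟩ := hany.mp h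
        simp only [true_iff]
        exact ⟨c, hc, by simp [pvUnion, hm]⟩
      · rw [if_neg h, ih]
        constructor
        · rintro ⟨c, hc, hm⟩
          exact ⟨c, hc, by simp only [pvUnion, List.flatMap_cons, List.mem_append]; right; exact hm⟩
        · rintro ⟨c, hc, hm⟩
          simp only [pvUnion, List.flatMap_cons, List.mem_append] at hm
          rcases hm with hm | hm
          · exact absurd (hany.mpr ⟨c, hc, hm⟩) h
          · exact ⟨c, hc, hm⟩

lemma get?_foldl_insert_const (t : String) (l : List String) (d : PySem.Dict String String) (c : String) :
    (l.foldl (fun d x => d.insert x t) d).get? c = if c ∈ l then some t else d.get? c := by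
  induction l generalizing d with
  | nil => simp
  | cons x xs ih =>
      simp only [List.foldl_cons, ih, PySem.Dict.get?_insert, List.mem_cons]
      by_cases hx : c ∈ xs
      · simp [hx]
      · by_cases hc : c = x <;> simp [hc, hx]

lemma get?_pvBuildIndex (cs : PySem.Dict String (List String)) (t : String) (ks : List String)
    (d : PySem.Dict String String) (c : String) :
    (pvBuildIndex cs t ks d).get? c = if c ∈ pvUnion cs ks then some t else d.get? c := by
  induction ks generalizing d with
  | nil => simp [pvBuildIndex, pvUnion]
  | cons k rest ih =>
      simp only [pvBuildIndex, List.foldl_cons, pvUnion, List.flatMap_cons, List.mem_append]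
      rw [show (rest.foldl (fun d scope_key => (cs.getD scope_key []).foldl (fun d c => d.insert c t) d)
            ((cs.getD k []).foldl (fun d c => d.insert c t) d)) = pvBuildIndex cs t rest ((cs.getD k []).foldl (fun d c => d.insert c t) d) from rfl,
          ih, get?_foldl_insert_const, pvUnion]
      by_cases h1 : c ∈ rest.flatMap (fun k => cs.getD k []) <;> by_cases h2 : c ∈ cs.getD k [] <;> simp [h1, h2]

lemma pvFlags_foldl (d : PySem.Dict String String) (cm : List String) (f : Bool × Bool) :
    cm.foldl (fun (f : Bool × Bool) c =>
      let t := d.get? c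
      if t = some "pure_player" then (true, f.2)
      else if t = some "hybrid" then (f.1, true)
      else f) f
    = (f.1 || cm.any (fun c => d.get? c = some "pure_player"),
       f.2 || cm.any (fun c => d.get? c = some "hybrid")) := by
  induction cm generalizing f with
  | nil => simp
  | cons c rest ih =>
      simp only [List.foldl_cons, List.any_cons, ih]
      by_cases h1 : d.get? c = some "pure_player"
      · simp [h1]
      · by_cases h2 : d.get? c = some "hybrid" <;> simp [h1, h2]

-- ===== VERDICT (by name: the statement is the Claim_ definition above) =====
theorem identify_company_scope_type_py_spec : Claim_equal_identify_company_scope_type_py := by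
  intro cm csm cs _
  unfold Spec_identify_company_scope_type_py identify_company_scope_type_py identify_company_scope_type_py_alt
  by_cases hcm : cm = []
  · simp [hcm]
  · simp only [if_neg hcm]
    set scopes := PySem.Dict.mk ((PySem.Dict.mk cs).getD "companies" []) with hscopes
    set pureKs := (PySem.Dict.mk csm).getD "pure_player_scopes" [] with hp
    set hybKs := (PySem.Dict.mk csm).getD "hybrid_scopes" [] with hh
    rw [pvFlags_foldl]
    have hget : ∀ c, (pvBuildIndex scopes "pure_player" pureKs
        (pvBuildIndex scopes "hybrid" hybKs PySem.Dict.empty)).get? c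
        = if c ∈ pvUnion scopes pureKs then some "pure_player"
          else if c ∈ pvUnion scopes hybKs then some "hybrid" else none := by
      intro c
      rw [get?_pvBuildIndex, get?_pvBuildIndex]
      by_cases h1 : c ∈ pvUnion scopes pureKs <;> by_cases h2 : c ∈ pvUnion scopes hybKs <;>
        simp [h1, h2]
    by_cases hP : pvScopeHit cm scopes pureKs = true
    · have : cm.any (fun c => (pvBuildIndex scopes "pure_player" pureKs
          (pvBuildIndex scopes "hybrid" hybKs PySem.Dict.empty)).get? c = some "pure_player") = true := by
        rw [pvScopeHit_iff] at hP
        obtain ⟨c, hc, hm⟩ := hP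
        simp only [List.any_eq_true]
        exact ⟨c, hc, by simp [hget c, hm]⟩
      simp [hP, this]
    · have hnoP : ∀ c ∈ cm, c ∉ pvUnion scopes pureKs := by
        intro c hc hm
        exact hP ((pvScopeHit_iff cm scopes pureKs).mpr ⟨c, hc, hm⟩)
      have hPfalse : cm.any (fun c => (pvBuildIndex scopes "pure_player" pureKs
          (pvBuildIndex scopes "hybrid" hybKs PySem.Dict.empty)).get? c = some "pure_player") = false := by
        simp only [List.any_eq_false]
        intro c hc
        simp only [hget c, decide_eq_true_eq]
        intro habs
        split_ifs at habs with h1 h2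
        · exact hnoP c hc h1
        · simp at habs
      have hHiff : (cm.any (fun c => (pvBuildIndex scopes "pure_player" pureKs
          (pvBuildIndex scopes "hybrid" hybKs PySem.Dict.empty)).get? c = some "hybrid"))
          = pvScopeHit cm scopes hybKs := by
        by_cases hH : pvScopeHit cm scopes hybKs = true
        · rw [hH]
          obtain ⟨c, hc, hm⟩ := (pvScopeHit_iff cm scopes hybKs).mp hH
          simp only [List.any_eq_true]
          exact ⟨c, hc, by simp [hget c, hm, hnoP c hc]⟩
        · rw [Bool.not_eq_true] at hH
          rw [hH]
          have hnoH : ∀ c ∈ cm, c ∉ pvUnion scopes hybKs := by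
            intro c hc hm
            exact absurd ((pvScopeHit_iff cm scopes hybKs).mpr ⟨c, hc, hm⟩) (by simp [hH])
          simp only [List.any_eq_false, decide_eq_true_eq]
          intro c hc habs
          rw [hget c] at habs
          split_ifs at habs with h1 h2
          · simp at habs
          · exact hnoH c hc h2
      simp [hP, hPfalse, hHiff]
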